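-- pv_equiv track=rewrite | github.com/the-full-stack/website | docs/blog/posts/megatron-lm-parallelism/pipeline/pipeline.py | clock_cycles
-- ===== SOURCE A (Python) =====
-- def clock_cycles(n_microbatches, n_partritions):
--     n_clock_cycles = n_partritions + n_microbatches - 1
--     for clock_idx in range(n_clock_cycles):
--         start_partrition = max(clock_idx+1-n_microbatches, 0)
--         end_partrition = min(clock_idx+1, n_partritions)
--
--         tasks = []
--         for partrition_idx in range(start_partrition, end_partrition):
--             microbatch_idx = clock_idx-partrition_idx
--             task = (microbatch_idx, partrition_idx)
--             tasks.append(task)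
--
--         yield tasks
-- ===== SOURCE B (Python) =====
-- def clock_cycles(n_microbatches, n_partritions):
--     # Bucket each task (microbatch, partition) by its anti-diagonal clock index
--     # microbatch_idx + partrition_idx; partition-outer order keeps buckets sorted.
--     buckets = {}
--     if n_microbatches > 0:
--         for partrition_idx in range(n_partritions):
--             for microbatch_idx in range(n_microbatches):
--                 buckets.setdefault(microbatch_idx + partrition_idx, []).append(
--                     (microbatch_idx, partrition_idx))
--     for clock_idx in range(n_partritions + n_microbatches - 1):
--         yield buckets.get(clock_idx, [])
-- ===== Notes on version B (the rewrite author's own statement) =====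
-- stated objective: alternative
-- what changed: Instead of computing each clock cycle's partition interval with max/min arithmetic, B makes one pass over all (microbatch, partition) tasks, bucketing each into a dict keyed by its anti-diagonal clock index (microbatch+partition, partition-outer order keeps buckets sorted), then yields the buckets in clock order.
import Mathlib
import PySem

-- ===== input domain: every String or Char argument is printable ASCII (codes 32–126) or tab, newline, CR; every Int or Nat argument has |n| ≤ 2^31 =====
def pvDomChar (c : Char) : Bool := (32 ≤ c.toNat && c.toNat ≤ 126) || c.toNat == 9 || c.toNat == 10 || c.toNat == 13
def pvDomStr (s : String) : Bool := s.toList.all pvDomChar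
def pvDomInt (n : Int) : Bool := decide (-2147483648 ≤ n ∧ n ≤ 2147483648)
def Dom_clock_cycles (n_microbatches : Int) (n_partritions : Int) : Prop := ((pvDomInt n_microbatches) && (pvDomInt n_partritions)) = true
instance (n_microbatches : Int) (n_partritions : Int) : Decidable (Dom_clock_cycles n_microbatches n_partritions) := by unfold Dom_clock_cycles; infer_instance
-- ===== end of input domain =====

-- B replaces A's per-cycle interval arithmetic by bucketing each (microbatch, partition)
-- task into a dict keyed by its anti-diagonal clock index (objective: alternative decomposition).

-- ===== PORT A =====
def clock_cycles (n_microbatches : Int) (n_partritions : Int) : List (List (Int × Int)) :=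
  (PySem.List.pyRange 0 (n_partritions + n_microbatches - 1) 1).map (fun clock_idx =>
    (PySem.List.pyRange (max (clock_idx + 1 - n_microbatches) 0) (min (clock_idx + 1) n_partritions) 1).foldl
      (fun tasks partrition_idx => tasks ++ [(clock_idx - partrition_idx, partrition_idx)]) [])

-- ===== PORT B =====
def clock_cycles_alt (n_microbatches : Int) (n_partritions : Int) : List (List (Int × Int)) :=
  let buckets : PySem.Dict Int (List (Int × Int)) :=
    if 0 < n_microbatches then
    (PySem.List.pyRange 0 n_partritions 1).foldl
      (fun d partrition_idx =>
        (PySem.List.pyRange 0 n_microbatches 1).foldl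
          (fun d microbatch_idx =>
            d.modify (microbatch_idx + partrition_idx) []
              (· ++ [(microbatch_idx, partrition_idx)]))
          d)
      PySem.Dict.empty
    else PySem.Dict.empty
  (PySem.List.pyRange 0 (n_partritions + n_microbatches - 1) 1).map
    (fun clock_idx => buckets.getD clock_idx [])

-- ===== PRECONDITION & SPEC =====
def Spec_clock_cycles (n_microbatches : Int) (n_partritions : Int) (out : List (List (Int × Int))) : Prop := out = clock_cycles_alt n_microbatches n_partritions
instance (n_microbatches : Int) (n_partritions : Int) (out : List (List (Int × Int))) : Decidable (Spec_clock_cycles n_microbatches n_partritions out) := by unfold Spec_clock_cycles; infer_instance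

-- ===== CLAIM (what is proved, stated in full; the proofs are below) =====
def Claim_equal_clock_cycles : Prop := ∀ (n_microbatches : Int) (n_partritions : Int), Dom_clock_cycles n_microbatches n_partritions → Spec_clock_cycles n_microbatches n_partritions (clock_cycles n_microbatches n_partritions)

-- ===== LEMMAS AND PROOFS =====

theorem foldl_flatMap' {α β γ : Type} (l : List α) (g : α → List β) (f : γ → β → γ) (i : γ) :
    (l.flatMap g).foldl f i = l.foldl (fun acc a => (g a).foldl f acc) i := by
  induction l generalizing i with
  | nil => rfl
  | cons x xs ih => simp [List.flatMap_cons, List.foldl_append, ih]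

theorem flatMap_if_eq_map_filter {β : Type} (l : List Int) (P : Int → Prop) [DecidablePred P]
    (h : Int → β) :
    (l.flatMap (fun q => if P q then [h q] else []))
      = (l.filter (fun q => decide (P q))).map h := by
  induction l with
  | nil => rfl
  | cons x xs ih =>
    by_cases hx : P x <;> simp [hx, ih]

theorem filter_pyRange_interval (a b L U : Int) :
    (PySem.List.pyRange a b 1).filter (fun q => decide (L ≤ q ∧ q < U))
      = PySem.List.pyRange (max L a) (min U b) 1 := by
  haveI : Std.Antisymm (fun (x y : Int) => x < y) :=
    ⟨fun _ _ h1 h2 => absurd h2 (lt_asymm h1)⟩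
  refine List.Perm.eq_of_pairwise'
    (List.Pairwise.filter _ (PySem.List.pairwise_lt_pyRange_one a b))
    (PySem.List.pairwise_lt_pyRange_one _ _) ?_
  rw [List.perm_ext_iff_of_nodup
    ((PySem.List.nodup_pyRange_one a b).filter _) (PySem.List.nodup_pyRange_one _ _)]
  intro x
  simp only [List.mem_filter, PySem.List.mem_pyRange_one, decide_eq_true_eq]
  omega

theorem flatMap_if_interval {β : Type} (a b L U : Int) (h : Int → β) :
    (PySem.List.pyRange a b 1).flatMap (fun q => if L ≤ q ∧ q < U then [h q] else [])
      = (PySem.List.pyRange (max L a) (min U b) 1).map h := by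
  rw [flatMap_if_eq_map_filter, filter_pyRange_interval]

theorem filter_eq_single (v : Int) (l : List Int) (hnd : l.Nodup) :
    l.filter (fun x => x == v) = if v ∈ l then [v] else [] := by
  rw [show (fun x => x == v) = (· == v) from rfl, List.filter_beq]
  by_cases hm : v ∈ l
  · simp [hm, List.count_eq_one_of_mem hnd hm]
  · simp [hm, List.count_eq_zero_of_not_mem hm]

theorem bucket_getD (m p c : Int) :
    (((PySem.List.pyRange 0 p 1).foldl
        (fun d pi =>
          (PySem.List.pyRange 0 m 1).foldl
            (fun d mi => d.modify (mi + pi) [] (· ++ [(mi, pi)])) d)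
        (PySem.Dict.empty : PySem.Dict Int (List (Int × Int)))).getD c [])
      = (PySem.List.pyRange (max (c + 1 - m) 0) (min (c + 1) p) 1).map (fun q => (c - q, q)) := by
  -- flatten the nested loop into one loop over key/value pairs
  have hflat :
      ((PySem.List.pyRange 0 p 1).foldl
        (fun d pi =>
          (PySem.List.pyRange 0 m 1).foldl
            (fun d mi => d.modify (mi + pi) [] (· ++ [(mi, pi)])) d)
        (PySem.Dict.empty : PySem.Dict Int (List (Int × Int))))
      = (((PySem.List.pyRange 0 p 1).flatMap
            (fun pi => (PySem.List.pyRange 0 m 1).map (fun mi => ((mi + pi : Int), ((mi : Int), pi))))).foldl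
          (fun d pr => d.modify pr.1 [] (· ++ [pr.2])) PySem.Dict.empty) := by
    rw [foldl_flatMap']
    simp [List.foldl_map]
  rw [hflat, PySem.Dict.getD_foldl_modify_append]
  simp only [PySem.Dict.getD_empty, List.nil_append]
  rw [List.filter_flatMap, List.map_flatMap]
  have hinner : ∀ pi : Int,
      (((PySem.List.pyRange 0 m 1).map (fun mi => ((mi + pi : Int), ((mi : Int), pi)))).filter
          (fun pr => pr.1 == c)).map (·.2)
        = if c + 1 - m ≤ pi ∧ pi < c + 1 then [((c - pi : Int), pi)] else [] := by
    intro pi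
    rw [List.filter_map]
    have hpred : ((fun pr : Int × (Int × Int) => pr.1 == c) ∘ fun mi => ((mi + pi : Int), ((mi : Int), pi)))
        = fun mi => mi == c - pi := by
      funext mi
      rw [Function.comp_apply, Bool.eq_iff_iff]
      simp only [beq_iff_eq]
      omega
    rw [hpred, filter_eq_single _ _ (PySem.List.nodup_pyRange_one 0 m)]
    by_cases hc : c + 1 - m ≤ pi ∧ pi < c + 1
    · rw [if_pos (PySem.List.mem_pyRange_one.mpr (by omega)), if_pos hc]
      rfl
    · have hnm : (c - pi) ∉ PySem.List.pyRange 0 m 1 := fun hmem =>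
        hc (by have := PySem.List.mem_pyRange_one.mp hmem; omega)
      rw [if_neg hnm, if_neg hc]
      rfl
  calc ((PySem.List.pyRange 0 p 1).flatMap fun pi =>
        (((PySem.List.pyRange 0 m 1).map (fun mi => ((mi + pi : Int), ((mi : Int), pi)))).filter
          (fun pr => pr.1 == c)).map (·.2))
      = (PySem.List.pyRange 0 p 1).flatMap
          (fun pi => if c + 1 - m ≤ pi ∧ pi < c + 1 then [((c - pi : Int), pi)] else []) := by
        exact List.flatMap_congr (fun pi _ => hinner pi)
    _ = (PySem.List.pyRange (max (c + 1 - m) 0) (min (c + 1) p) 1).map (fun q => (c - q, q)) := by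
        exact flatMap_if_interval 0 p (c + 1 - m) (c + 1) (fun q => (c - q, q))

-- ===== VERDICT (by name: the statement is the Claim_ definition above) =====
theorem clock_cycles_spec : Claim_equal_clock_cycles := by
  intro m p _
  unfold Spec_clock_cycles clock_cycles clock_cycles_alt
  apply List.map_congr_left
  intro c _
  rw [PySem.List.foldl_append_singleton_eq_map, List.nil_append]
  by_cases hm : 0 < m
  · rw [if_pos hm, bucket_getD]
  · rw [if_neg hm, PySem.List.pyRange_one_eq_nil (by omega)]
    simp [PySem.Dict.getD_empty]
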